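-- pv_equiv track=rewrite | github.com/tastanlab/darkin | create_darkin_split.py | are_there_contradicting_datasets
-- ===== SOURCE A (Python) =====
-- def are_there_contradicting_datasets(kinase_in):
--     similar_kinases = list(set(kinase_in.keys()))
--     similar_kinases.sort()
--
--     first_kinase_datasets = kinase_in[similar_kinases[0]]
--
--     # So logically if the first kinase is in the same dataset with the 2nd, and the 3rd, then the 2nd and 3rd should also be in the same dataset.
--     # similar to transitivity?
--     for kinase in similar_kinases[1:]:
--         other_kinase_datasets = kinase_in[kinase]
--         if ("test" in first_kinase_datasets and "train" in other_kinase_datasets) or ("train" in first_kinase_datasets and "test" in other_kinase_datasets):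
--             return False
--
--     return True
-- ===== SOURCE B (Python) =====
-- def are_there_contradicting_datasets(kinase_in):
--     first = min(kinase_in.keys())
--     first_ds = kinase_in[first]
--     others = set()
--     for k, ds in kinase_in.items():
--         if k != first:
--             others.update(ds)
--     return not (("test" in first_ds and "train" in others)
--                 or ("train" in first_ds and "test" in others))
-- ===== Notes on version B (the rewrite author's own statement) =====
-- stated objective: alternative
-- what changed: B drops the sort entirely: it takes the lexicographic minimum key with min(), then makes one pass over the dict's items (not per-key lookups) accumulating a union set of all other kinases' dataset labels, and decides once from that set; A sorts the keys and re-checks a combined condition per kinase with an early return.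
import Mathlib
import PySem

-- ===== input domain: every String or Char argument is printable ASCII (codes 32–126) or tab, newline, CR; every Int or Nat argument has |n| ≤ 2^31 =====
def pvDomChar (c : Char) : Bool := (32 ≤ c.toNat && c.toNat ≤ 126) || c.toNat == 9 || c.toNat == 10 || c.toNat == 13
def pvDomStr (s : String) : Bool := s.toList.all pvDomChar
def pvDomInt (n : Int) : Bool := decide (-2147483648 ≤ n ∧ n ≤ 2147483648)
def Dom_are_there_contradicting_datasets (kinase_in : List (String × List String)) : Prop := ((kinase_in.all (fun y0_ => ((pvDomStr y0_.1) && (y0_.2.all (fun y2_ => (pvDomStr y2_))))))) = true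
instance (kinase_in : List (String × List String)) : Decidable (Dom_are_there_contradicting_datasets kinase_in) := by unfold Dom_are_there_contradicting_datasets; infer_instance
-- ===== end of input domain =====

-- B avoids sorting: it takes the minimum key with min(), then one pass over the dict's
-- items builds a union set of all other kinases' labels and decides once (objective: alternative).

-- ===== PORT A =====
-- the for-loop over similar_kinases[1:], early-returning False on the combined condition
def pvContraLoopA (fd : List String) (d : PySem.Dict String (List String))
    (ks : List String) : Bool :=
  match ks with
  | [] => true
  | k :: rest =>
    let od := d.getD k []
    if (fd.contains "test" && od.contains "train") || (fd.contains "train" && od.contains "test")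
    then false
    else pvContraLoopA fd d rest

def are_there_contradicting_datasets (kinase_in : List (String × List String)) : Bool :=
  let d := PySem.Dict.ofList kinase_in
  let similar_kinases := PySem.List.sorted (PySem.Set.ofList d.keys) (fun x => x) false
  match similar_kinases with
  | [] => false   -- Python raises IndexError on similar_kinases[0]; excluded by Pre_
  | first :: rest =>
    let first_kinase_datasets := d.getD first []
    pvContraLoopA first_kinase_datasets d rest

-- ===== PORT B =====
def are_there_contradicting_datasets_alt (kinase_in : List (String × List String)) : Bool :=
  let d := PySem.Dict.ofList kinase_in
  match PySem.List.min? d.keys (fun x => x) with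
  | none => false   -- Python's min() raises ValueError on an empty dict; excluded by Pre_
  | some first =>
    let first_ds := d.getD first []
    let others := d.items.foldl
      (fun s p => if p.1 ≠ first then PySem.Set.update s p.2 else s) PySem.Set.empty
    !((first_ds.contains "test" && others.contains "train")
      || (first_ds.contains "train" && others.contains "test"))

-- ===== PRECONDITION & SPEC =====
-- Pre_ excludes only the empty dict, on which A raises IndexError (and B ValueError).
def Pre_are_there_contradicting_datasets (kinase_in : List (String × List String)) : Prop :=
  kinase_in ≠ []
instance (kinase_in : List (String × List String)) : Decidable (Pre_are_there_contradicting_datasets kinase_in) := by unfold Pre_are_there_contradicting_datasets; infer_instance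

def pvWitness_are_there_contradicting_datasets : (List (String × List String)) :=
  [("a", ["train"]), ("b", ["test"])]

def Spec_are_there_contradicting_datasets (kinase_in : List (String × List String)) (out : Bool) : Prop := out = are_there_contradicting_datasets_alt kinase_in
instance (kinase_in : List (String × List String)) (out : Bool) : Decidable (Spec_are_there_contradicting_datasets kinase_in out) := by unfold Spec_are_there_contradicting_datasets; infer_instance

-- ===== CLAIM (what is proved, stated in full; the proofs are below) =====
def Claim_equal_are_there_contradicting_datasets : Prop := ∀ (kinase_in : List (String × List String)), Dom_are_there_contradicting_datasets kinase_in → Pre_are_there_contradicting_datasets kinase_in → Spec_are_there_contradicting_datasets kinase_in (are_there_contradicting_datasets kinase_in)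

-- ===== LEMMAS AND PROOFS =====

-- 'any' of a disjunction splits into a disjunction of 'any's
theorem pvAnyOr (l : List String) (p q : String → Bool) :
    l.any (fun x => p x || q x) = (l.any p || l.any q) := by
  induction l with
  | nil => rfl
  | cons x t ih =>
    simp [List.any_cons, ih]; cases p x <;> cases q x <;> simp [Bool.or_comm]

-- A's early-return loop is the negation of an 'any' over the combined condition
theorem pvContraLoopA_eq_any (fd : List String) (d : PySem.Dict String (List String))
    (ks : List String) :
    pvContraLoopA fd d ks
      = !(ks.any (fun k => (fd.contains "test" && (d.getD k []).contains "train")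
            || (fd.contains "train" && (d.getD k []).contains "test"))) := by
  induction ks with
  | nil => rfl
  | cons k rest ih =>
    simp only [pvContraLoopA, List.any_cons, ih]
    by_cases h : ((fd.contains "test" && (d.getD k []).contains "train")
        || (fd.contains "train" && (d.getD k []).contains "test")) = true <;> simp

-- membership in B's union-accumulating fold
theorem mem_foldl_update (first : String) (l : List (String × List String))
    (s : PySem.Set String) (y : String) :
    (y ∈ l.foldl (fun s p => if p.1 ≠ first then PySem.Set.update s p.2 else s) s)
      ↔ y ∈ s ∨ ∃ p ∈ l, p.1 ≠ first ∧ y ∈ p.2 := by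
  induction l generalizing s with
  | nil => simp
  | cons p rest ih =>
    simp only [List.foldl_cons]
    by_cases h : p.1 ≠ first
    · simp only [if_pos h, ih, PySem.Set.mem_update]
      constructor
      · rintro ((hy | hy) | ⟨q, hq, hq1, hy⟩)
        · exact Or.inl hy
        · exact Or.inr ⟨p, List.mem_cons_self .., h, hy⟩
        · exact Or.inr ⟨q, List.mem_cons_of_mem _ hq, hq1, hy⟩
      · rintro (hy | ⟨q, hq, hq1, hy⟩)
        · exact Or.inl (Or.inl hy)
        · rcases List.mem_cons.mp hq with rfl | hq
          · exact Or.inl (Or.inr hy)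
          · exact Or.inr ⟨q, hq, hq1, hy⟩
    · simp only [if_neg h, ih]
      rw [not_not] at h
      constructor
      · rintro (hy | ⟨q, hq, hq1, hy⟩)
        · exact Or.inl hy
        · exact Or.inr ⟨q, List.mem_cons_of_mem _ hq, hq1, hy⟩
      · rintro (hy | ⟨q, hq, hq1, hy⟩)
        · exact Or.inl hy
        · rcases List.mem_cons.mp hq with rfl | hq
          · exact absurd h hq1.elim
          · exact Or.inr ⟨q, hq, hq1, hy⟩

-- the head of A's sorted key list is exactly B's min() of the keys
theorem pvSortedHead_eq_min (d : PySem.Dict String (List String)) (first : String)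
    (rest : List String)
    (hs : PySem.List.sorted d.keys (fun x => x) false = first :: rest) :
    PySem.List.min? d.keys (fun x => x) = some first := by
  have hperm : (first :: rest).Perm d.keys := hs ▸ PySem.List.sorted_perm d.keys _ false
  have hfirst_mem : first ∈ d.keys := hperm.mem_iff.mp (List.mem_cons_self ..)
  have hne : d.keys ≠ [] := by rintro h; rw [h] at hperm; simp at hperm
  obtain ⟨m, hm⟩ : ∃ m, PySem.List.min? d.keys (fun x => x) = some m := by
    cases h : PySem.List.min? d.keys (fun x => x) with
    | none => exact absurd ((PySem.List.min?_eq_none_iff ..).mp h) hne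
    | some m => exact ⟨m, rfl⟩
  have hpw := PySem.List.sorted_pairwise d.keys (fun x => x) (κ := String)
  rw [hs] at hpw
  have hfle : ∀ y ∈ d.keys, first ≤ y := by
    intro y hy
    rcases List.mem_cons.mp (hperm.mem_iff.mpr hy) with rfl | hy'
    · exact le_refl _
    · exact (List.pairwise_cons.mp hpw).1 y hy'
  exact hm.trans (congrArg some (le_antisymm (PySem.List.min?_isMin hm first hfirst_mem)
    (hfle m (PySem.List.min?_mem hm))))

-- ===== VERDICT (by name: the statement is the Claim_ definition above) =====
theorem are_there_contradicting_datasets_spec : Claim_equal_are_there_contradicting_datasets := by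
  intro kinase_in _ _
  unfold Spec_are_there_contradicting_datasets
  unfold are_there_contradicting_datasets are_there_contradicting_datasets_alt
  simp only []
  set d := PySem.Dict.ofList kinase_in with hd
  have hnd : d.keys.Nodup := PySem.Dict.nodup_keys_ofList kinase_in
  rw [PySem.Set.ofList_eq_self_of_nodup d.keys hnd]
  cases hs : PySem.List.sorted d.keys (fun x => x) false with
  | nil =>
    rw [(PySem.List.min?_eq_none_iff ..).mpr ((PySem.List.sorted_eq_nil_iff ..).mp hs)]
  | cons first rest =>
    rw [pvSortedHead_eq_min d first rest hs]
    have hperm : (first :: rest).Perm d.keys := hs ▸ PySem.List.sorted_perm d.keys _ false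
    have hcons_nodup : (first :: rest).Nodup := hperm.symm.nodup hnd
    -- membership in rest = a key other than first
    have hmemrest : ∀ k, k ∈ rest ↔ k ∈ d.keys ∧ k ≠ first := by
      intro k
      constructor
      · intro hk
        refine ⟨hperm.mem_iff.mp (List.mem_cons_of_mem _ hk), ?_⟩
        rintro rfl
        exact (List.nodup_cons.mp hcons_nodup).1 hk
      · rintro ⟨hk, hne⟩
        rcases List.mem_cons.mp (hperm.mem_iff.mpr hk) with rfl | h
        · exact absurd rfl hne
        · exact h
    -- the accumulated label set contains lbl iff some other kinase's datasets do
    have hkey : ∀ lbl : String,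
        (rest.any (fun k => (d.getD k []).contains lbl))
          = PySem.Set.contains
              (d.items.foldl (fun s p => if p.1 ≠ first then PySem.Set.update s p.2 else s)
                PySem.Set.empty) lbl := by
      intro lbl
      rw [Bool.eq_iff_iff, PySem.Set.contains_iff, mem_foldl_update]
      simp only [List.any_eq_true, List.contains_iff_mem, PySem.Set.empty]
      constructor
      · rintro ⟨k, hk, hlbl⟩
        obtain ⟨hkk, hkne⟩ := (hmemrest k).mp hk
        obtain ⟨⟨k1, v⟩, hp, hpk⟩ := List.mem_map.mp hkk
        dsimp only at hpk
        subst hpk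
        refine Or.inr ⟨(k1, v), hp, hkne, ?_⟩
        rwa [PySem.Dict.getD_of_mem_items d hp hnd []] at hlbl
      · rintro (h | ⟨p, hp, hpne, hlbl⟩)
        · simp at h
        · obtain ⟨k1, v⟩ := p
          refine ⟨k1, (hmemrest k1).mpr ⟨PySem.Dict.mem_keys_of_mem_items d hp, hpne⟩, ?_⟩
          rwa [PySem.Dict.getD_of_mem_items d hp hnd []]
    dsimp only
    rw [pvContraLoopA_eq_any, ← hkey, ← hkey]
    cases hft : (d.getD first []).contains "test" <;>
      cases hfr : (d.getD first []).contains "train" <;>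
      simp [pvAnyOr]
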